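-- pv_equiv track=rewrite | github.com/RuYingran/SAND-Difference-analysis | main.py | generate_all_possibilities
-- ===== SOURCE A (Python) =====
-- def generate_all_possibilities(binary_str, positions):
--     length = len(positions)
--     possibilities = []
--
--     for i in range(2**length):  # 生成所有可能的组合
--         possibility = list(binary_str)
--         for j in range(length):
--             bit = (i >> j) & 1  # 检查第j位是0还是1
--             possibility[positions[j]] = str(bit)  # 将指定位置设置为相应的值
--         possibilities.append(''.join(possibility))
--
--     return possibilities
-- ===== SOURCE B (Python) =====
-- def generate_all_possibilities(binary_str, positions):
--     # Recursively generate the bit assignments (first position varies fastest),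
--     # then fill each copy of the string by zipping positions with the bits.
--     def all_bits(n):
--         if n == 0:
--             return [[]]
--         rest = all_bits(n - 1)
--         return [[b] + t for t in rest for b in '01']
--
--     possibilities = []
--     for bits in all_bits(len(positions)):
--         chars = list(binary_str)
--         for p, b in zip(positions, bits):
--             chars[p] = b
--         possibilities.append(''.join(chars))
--     return possibilities
-- ===== Notes on version B (the rewrite author's own statement) =====
-- stated objective: alternative
-- what changed: Replaces the integer counter with bit-shift extraction by a recursive generator of bit-lists (first position varying fastest) and a zip-based assignment pass over positions.
import Mathlib
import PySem

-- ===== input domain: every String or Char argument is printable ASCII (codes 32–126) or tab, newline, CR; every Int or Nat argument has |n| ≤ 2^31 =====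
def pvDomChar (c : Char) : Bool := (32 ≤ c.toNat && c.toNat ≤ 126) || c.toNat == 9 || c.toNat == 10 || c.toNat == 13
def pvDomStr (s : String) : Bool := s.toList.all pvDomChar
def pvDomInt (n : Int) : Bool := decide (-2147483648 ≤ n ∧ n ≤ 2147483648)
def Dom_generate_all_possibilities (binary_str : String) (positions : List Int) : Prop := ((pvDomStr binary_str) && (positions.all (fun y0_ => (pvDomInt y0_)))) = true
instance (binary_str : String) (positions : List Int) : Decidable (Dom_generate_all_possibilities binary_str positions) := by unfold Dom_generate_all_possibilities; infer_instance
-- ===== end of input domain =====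

-- B replaces A's integer counter + bit shifts by a recursive generator of bit-lists and a zip
-- assignment pass (objective: alternative, same cost).

-- ===== PORT A =====
-- str(bit) for bit ∈ {0,1}: a one-character string; since every element of list(binary_str) is a
-- one-character string too, the list is modelled as List Char and ''.join as String.mk (exact here).
def strOfBit (bit : Nat) : Char := if bit == 1 then '1' else '0'

def generate_all_possibilities (binary_str : String) (positions : List Int) : List String :=
  let length := positions.length
  (List.range (2 ^ length)).foldl (fun possibilities (i : Nat) =>
    possibilities ++ [String.mk ((List.range length).foldl (fun possibility (j : Nat) =>
      PySem.List.pySetD possibility ((PySem.List.pyGet? positions (j : Int)).getD 0)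
        (strOfBit ((i >>> j) &&& 1))) binary_str.toList)]) []

-- ===== PORT B =====
-- all_bits n = the comprehension [[b] + t for t in all_bits (n-1) for b in '01']
def all_bits : Nat → List (List Char)
  | 0 => [[]]
  | n + 1 => (all_bits n).flatMap (fun t => ['0', '1'].map (fun b => b :: t))

def generate_all_possibilities_alt (binary_str : String) (positions : List Int) : List String :=
  (all_bits positions.length).foldl (fun possibilities bits =>
    possibilities ++ [String.mk ((positions.zip bits).foldl
      (fun chars pb => PySem.List.pySetD chars pb.1 pb.2) binary_str.toList)]) []

-- ===== PRECONDITION & SPEC =====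
-- Pre_ excludes exactly the inputs on which A raises IndexError: some position is not a valid
-- Python index into binary_str.
def Pre_generate_all_possibilities (binary_str : String) (positions : List Int) : Prop :=
  ∀ p ∈ positions, PySem.Raise.InRange binary_str.toList.length p
instance (binary_str : String) (positions : List Int) : Decidable (Pre_generate_all_possibilities binary_str positions) := by unfold Pre_generate_all_possibilities; infer_instance

def pvWitness_generate_all_possibilities : String × List Int := ("0110", [0, -1, 2])

def Spec_generate_all_possibilities (binary_str : String) (positions : List Int) (out : List String) : Prop := out = generate_all_possibilities_alt binary_str positions
instance (binary_str : String) (positions : List Int) (out : List String) : Decidable (Spec_generate_all_possibilities binary_str positions out) := by unfold Spec_generate_all_possibilities; infer_instance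

-- ===== CLAIM (what is proved, stated in full; the proofs are below) =====
def Claim_equal_generate_all_possibilities : Prop := ∀ (binary_str : String) (positions : List Int), Dom_generate_all_possibilities binary_str positions → Pre_generate_all_possibilities binary_str positions → Spec_generate_all_possibilities binary_str positions (generate_all_possibilities binary_str positions)

-- ===== LEMMAS AND PROOFS =====

-- the bit-list A's inner loop effectively uses: lsb k i = [bit 0 of i, …, bit (k-1) of i] as chars
def lsb (k i : Nat) : List Char := (List.range k).map (fun j => strOfBit ((i >>> j) &&& 1))

theorem lsb_succ (n i : Nat) : lsb (n + 1) i = strOfBit (i &&& 1) :: lsb n (i >>> 1) := by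
  unfold lsb
  rw [List.range_succ_eq_map, List.map_cons, List.map_map]
  refine congrArg₂ _ (by norm_num) ?_
  refine List.map_congr_left (fun j _ => ?_)
  simp only [Function.comp]
  rw [Nat.succ_eq_add_one, Nat.add_comm j 1, Nat.shiftRight_add]

theorem pvRangeTwoMul (m : Nat) :
    List.range (2 * m) = (List.range m).flatMap (fun r => [2 * r, 2 * r + 1]) := by
  induction m with
  | zero => rfl
  | succ m ih =>
    have h2 : 2 * (m + 1) = (2 * m + 1) + 1 := by omega
    rw [h2, List.range_succ, List.range_succ, List.range_succ, List.flatMap_append, ← ih]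
    simp

theorem all_bits_eq (n : Nat) : all_bits n = (List.range (2 ^ n)).map (lsb n) := by
  induction n with
  | zero => rfl
  | succ n ih =>
    have hpow : 2 ^ (n + 1) = 2 * 2 ^ n := by ring
    rw [all_bits, ih, hpow, pvRangeTwoMul, List.map_flatMap, List.flatMap_map]
    refine List.flatMap_congr (fun r _ => ?_)
    have h0 : lsb (n + 1) (2 * r) = '0' :: lsb n r := by
      rw [lsb_succ]
      have : (2 * r) &&& 1 = 0 := by rw [Nat.and_one_is_mod]; omega
      have h2 : (2 * r) >>> 1 = r := by
        rw [Nat.shiftRight_one]; omega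
      rw [this, h2]; rfl
    have h1 : lsb (n + 1) (2 * r + 1) = '1' :: lsb n r := by
      rw [lsb_succ]
      have : (2 * r + 1) &&& 1 = 1 := by rw [Nat.and_one_is_mod]; omega
      have h2 : (2 * r + 1) >>> 1 = r := by
        rw [Nat.shiftRight_one]; omega
      rw [this, h2]; rfl
    simp [h0, h1]

-- A's indexed inner loop equals B's zip inner loop, for any per-index bit function
theorem inner_eq (positions : List Int) (f : Nat → Char) (s : List Char) :
    (List.range positions.length).foldl (fun possibility (j : Nat) =>
        PySem.List.pySetD possibility ((PySem.List.pyGet? positions (j : Int)).getD 0) (f j)) s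
    = (positions.zip ((List.range positions.length).map f)).foldl
        (fun chars pb => PySem.List.pySetD chars pb.1 pb.2) s := by
  induction positions generalizing f s with
  | nil => rfl
  | cons p ps ih =>
    rw [List.length_cons, List.range_succ_eq_map]
    simp only [List.map_cons, List.map_map, List.zip_cons_cons, List.foldl_cons,
      List.foldl_map, PySem.List.pyGet?_zero_cons, Option.getD_some, Nat.cast_zero]
    have step : ∀ (l : List Char) (j : Nat),
        PySem.List.pySetD l ((PySem.List.pyGet? (p :: ps) ((j + 1 : Nat) : Int)).getD 0) (f (j + 1))
        = PySem.List.pySetD l ((PySem.List.pyGet? ps (j : Int)).getD 0) ((f ∘ (· + 1)) j) := by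
      intro l j
      have : ((j + 1 : Nat) : Int) = (j : Int) + 1 := by push_cast; ring
      rw [this, PySem.List.pyGet?_cons_succ]; rfl
    calc (List.range ps.length).foldl (fun l (j : Nat) =>
            PySem.List.pySetD l ((PySem.List.pyGet? (p :: ps) ((j + 1 : Nat) : Int)).getD 0) (f (j + 1)))
            (PySem.List.pySetD s p (f 0))
        = (List.range ps.length).foldl (fun l (j : Nat) =>
            PySem.List.pySetD l ((PySem.List.pyGet? ps (j : Int)).getD 0) ((f ∘ (· + 1)) j))
            (PySem.List.pySetD s p (f 0)) := by
          exact PySem.List.foldl_congr_mem _ _ _ _ (fun l j hj => step l j)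
      _ = _ := by
          rw [ih (f ∘ (· + 1)) (PySem.List.pySetD s p (f 0))]

-- ===== VERDICT (by name: the statement is the Claim_ definition above) =====
theorem generate_all_possibilities_spec : Claim_equal_generate_all_possibilities := by
  intro binary_str positions _ _
  unfold Spec_generate_all_possibilities generate_all_possibilities generate_all_possibilities_alt
  rw [all_bits_eq, List.foldl_map]
  refine PySem.List.foldl_congr_mem _ _ _ _ (fun acc i _ => ?_)
  rw [inner_eq positions (fun j => strOfBit ((i >>> j) &&& 1)) binary_str.toList]
  rfl
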